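-- pv_equiv track=rewrite | github.com/ericka-cespedes/IntroProgrammingPY | Practica7.py | validaListaIndices
-- ===== SOURCE A (Python) =====
-- def validaListaIndices(lista1, lista2, res):
--     if lista1==[]:
--         if len(lista2)<res:
--             return False
--         else:
--             return True
--     else:
--         if lista1[0]==0:
--             res+=1
--             #lista1[0]=1
--         return validaListaIndices(lista1[1:], lista2, res+1+lista1[0])
-- ===== SOURCE B (Python) =====
-- def validaListaIndices(lista1, lista2, res):
--     # closed form: the recursion just accumulates 1 + x (+1 for zeros) per element
--     return len(lista2) >= res + len(lista1) + sum(lista1) + lista1.count(0)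
-- ===== Notes on version B (the rewrite author's own statement) =====
-- stated objective: faster
-- what changed: Replaces the slicing recursion (lista1[1:] copies the list at every step) with a single closed-form comparison len(lista2) >= res + len(lista1) + sum(lista1) + lista1.count(0).
import Mathlib
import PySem

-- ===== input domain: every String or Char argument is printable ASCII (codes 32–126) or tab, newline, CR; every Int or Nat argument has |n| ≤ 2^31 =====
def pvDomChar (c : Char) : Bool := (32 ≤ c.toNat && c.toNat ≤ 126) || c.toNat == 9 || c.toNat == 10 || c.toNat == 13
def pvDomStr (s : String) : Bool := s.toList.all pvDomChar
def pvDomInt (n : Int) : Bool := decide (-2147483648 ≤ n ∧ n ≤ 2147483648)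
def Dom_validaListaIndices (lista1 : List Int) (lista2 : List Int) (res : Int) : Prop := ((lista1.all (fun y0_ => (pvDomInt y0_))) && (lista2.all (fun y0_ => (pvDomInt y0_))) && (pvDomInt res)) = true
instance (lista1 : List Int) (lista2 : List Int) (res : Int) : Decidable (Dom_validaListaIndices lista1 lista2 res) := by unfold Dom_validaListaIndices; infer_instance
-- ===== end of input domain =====

-- B replaces A's O(n^2) slicing recursion with one closed-form comparison (len + sum + zero count).

-- ===== PORT A =====
def validaListaIndices (lista1 : List Int) (lista2 : List Int) (res : Int) : Bool :=
  match lista1 with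
  | [] => if (lista2.length : Int) < res then false else true
  | x :: rest =>
    let res' := if x == 0 then res + 1 else res
    validaListaIndices rest lista2 (res' + 1 + x)

-- ===== PORT B =====
def validaListaIndices_alt (lista1 : List Int) (lista2 : List Int) (res : Int) : Bool :=
  decide ((lista2.length : Int) ≥ res + lista1.length + lista1.sum + PySem.List.count lista1 0)

-- ===== PRECONDITION & SPEC =====
def Spec_validaListaIndices (lista1 : List Int) (lista2 : List Int) (res : Int) (out : Bool) : Prop := out = validaListaIndices_alt lista1 lista2 res
instance (lista1 : List Int) (lista2 : List Int) (res : Int) (out : Bool) : Decidable (Spec_validaListaIndices lista1 lista2 res out) := by unfold Spec_validaListaIndices; infer_instance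

-- ===== CLAIM (what is proved, stated in full; the proofs are below) =====
def Claim_equal_validaListaIndices : Prop := ∀ (lista1 : List Int) (lista2 : List Int) (res : Int), Dom_validaListaIndices lista1 lista2 res → Spec_validaListaIndices lista1 lista2 res (validaListaIndices lista1 lista2 res)

-- ===== LEMMAS AND PROOFS =====
theorem validaListaIndices_eq_alt (lista1 lista2 : List Int) (res : Int) :
    validaListaIndices lista1 lista2 res = validaListaIndices_alt lista1 lista2 res := by
  induction lista1 generalizing res with
  | nil =>
    simp only [validaListaIndices, validaListaIndices_alt, PySem.List.count_eq,
      List.count_nil, List.sum_nil, List.length_nil]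
    rcases lt_or_ge ((lista2.length : Int)) res with h | h <;> simp [h] <;> omega
  | cons x rest ih =>
    simp only [validaListaIndices, ih, validaListaIndices_alt, PySem.List.count_eq]
    rw [decide_eq_decide]
    rcases eq_or_ne x 0 with h | h <;>
      simp [h, List.count_cons, List.sum_cons] <;> omega

-- ===== VERDICT (by name: the statement is the Claim_ definition above) =====
theorem validaListaIndices_spec : Claim_equal_validaListaIndices := by
  intro l1 l2 r _
  exact validaListaIndices_eq_alt l1 l2 r
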